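-- pv_equiv track=rewrite | github.com/Nebus01/AdventOfCode2024 | Day05/Day05.py | find_correct_updates
-- ===== SOURCE A (Python) =====
-- def validate_update(update, rules):
--     position = {page: idx for idx, page in enumerate(update)}
--     for x, y in rules:
--         if x in position and y in position and position[x] > position[y]:
--             return False
--     return True
--
-- def find_correct_updates(rules, updates):
--     correct_updates = []
--     incorrect_updates = []
--     for update in updates:
--         if validate_update(update, rules):
--             correct_updates.append(update)
--         else:
--             incorrect_updates.append(update)
--     return correct_updates, incorrect_updates
-- ===== SOURCE B (Python) =====
-- def _ordered(update, succ):
--     pages = set(update)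
--     seen = set()
--     for v in reversed(update):
--         if v in seen:
--             continue
--         for y in succ.get(v, ()):
--             if y != v and y in pages and y not in seen:
--                 return False
--         seen.add(v)
--     return True
--
-- def find_correct_updates(rules, updates):
--     succ = {}
--     for x, y in rules:
--         succ.setdefault(x, []).append(y)
--     correct_updates = []
--     incorrect_updates = []
--     for update in updates:
--         if _ordered(update, succ):
--             correct_updates.append(update)
--         else:
--             incorrect_updates.append(update)
--     return correct_updates, incorrect_updates
-- ===== Notes on version B (the rewrite author's own statement) =====
-- stated objective: alternative
-- what changed: B drops A's per-update position dictionary and per-update scan of all rules: it indexes the rules once (page -> pages required after it), then judges each update in a single reverse pass with a seen set, processing each page at its last occurrence and failing when a required successor is present in the update but not among the pages seen further right.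
import Mathlib
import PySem

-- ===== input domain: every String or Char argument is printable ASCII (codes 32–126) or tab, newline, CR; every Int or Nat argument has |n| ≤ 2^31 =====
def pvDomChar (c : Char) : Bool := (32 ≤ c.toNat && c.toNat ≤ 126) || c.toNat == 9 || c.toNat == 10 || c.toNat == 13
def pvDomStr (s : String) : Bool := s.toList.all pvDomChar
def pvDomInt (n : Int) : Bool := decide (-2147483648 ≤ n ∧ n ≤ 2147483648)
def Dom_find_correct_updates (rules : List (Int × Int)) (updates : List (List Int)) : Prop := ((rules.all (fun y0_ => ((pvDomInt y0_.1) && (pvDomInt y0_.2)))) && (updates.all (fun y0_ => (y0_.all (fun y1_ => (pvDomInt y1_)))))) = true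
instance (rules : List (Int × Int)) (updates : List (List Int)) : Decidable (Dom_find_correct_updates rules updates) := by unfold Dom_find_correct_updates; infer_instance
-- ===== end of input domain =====

-- ===== PORT A =====
-- B replaces A's per-update position dictionary + full rule scan by a one-off rule index and a
-- single reverse pass with a seen-set per update (objective: alternative decomposition).

-- position = {page: idx for idx, page in enumerate(update)}
def posDict (update : List Int) : PySem.Dict Int Int :=
  (PySem.List.enumerate update).foldl (fun d p => d.insert p.2 p.1) PySem.Dict.empty

-- for x, y in rules: if x in position and y in position and position[x] > position[y]: return False
def validateLoop (pos : PySem.Dict Int Int) : List (Int × Int) → Bool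
  | [] => true
  | (x, y) :: rest =>
    match pos.get? x, pos.get? y with
    | some px, some py => if px > py then false else validateLoop pos rest
    | _, _ => validateLoop pos rest

def validate_update (update : List Int) (rules : List (Int × Int)) : Bool :=
  validateLoop (posDict update) rules

def find_correct_updates (rules : List (Int × Int)) (updates : List (List Int)) : List (List Int) × List (List Int) :=
  updates.foldl
    (fun s update =>
      if validate_update update rules then (s.1 ++ [update], s.2) else (s.1, s.2 ++ [update]))
    ([], [])

-- ===== PORT B =====
-- succ = {}; for x, y in rules: succ.setdefault(x, []).append(y)
def ruleIndex (rules : List (Int × Int)) : PySem.Dict Int (List Int) :=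
  rules.foldl (fun d p => d.modify p.1 [] (fun l => l ++ [p.2])) PySem.Dict.empty

-- seen = set(); for v in reversed(update): if v in seen: continue;
--   for y in succ.get(v, ()): if y != v and y in pages and y not in seen: return False; seen.add(v)
def orderedLoop (succ : PySem.Dict Int (List Int)) (pages : PySem.Set Int) (seen : PySem.Set Int) : List Int → Bool
  | [] => true
  | v :: rest =>
    if PySem.Set.contains seen v then orderedLoop succ pages seen rest
    else if (succ.getD v []).any (fun y => y != v && PySem.Set.contains pages y && !(PySem.Set.contains seen y)) then
      false
    else orderedLoop succ pages (PySem.Set.add seen v) rest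

def find_correct_updates_alt (rules : List (Int × Int)) (updates : List (List Int)) : List (List Int) × List (List Int) :=
  let succ := ruleIndex rules
  updates.foldl
    (fun s update =>
      if orderedLoop succ (PySem.Set.ofList update) PySem.Set.empty update.reverse then (s.1 ++ [update], s.2)
      else (s.1, s.2 ++ [update]))
    ([], [])

-- ===== PRECONDITION & SPEC =====
def Spec_find_correct_updates (rules : List (Int × Int)) (updates : List (List Int)) (out : List (List Int) × List (List Int)) : Prop := out = find_correct_updates_alt rules updates
instance (rules : List (Int × Int)) (updates : List (List Int)) (out : List (List Int) × List (List Int)) : Decidable (Spec_find_correct_updates rules updates out) := by unfold Spec_find_correct_updates; infer_instance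

-- ===== CLAIM (what is proved, stated in full; the proofs are below) =====
def Claim_equal_find_correct_updates : Prop := ∀ (rules : List (Int × Int)) (updates : List (List Int)), Dom_find_correct_updates rules updates → Spec_find_correct_updates rules updates (find_correct_updates rules updates)

-- ===== LEMMAS AND PROOFS =====

lemma posDict_append (u : List Int) (x : Int) :
    posDict (u ++ [x]) = (posDict u).insert x (u.length : Int) := by
  simp [posDict, PySem.List.enumerate_append, List.foldl_append]

-- A's position dict records the LAST index of each page = first index in the reversed update.
lemma posDict_get?_rev (u : List Int) (a : Int) :
    (posDict u).get? a
      = (List.idxOf? a u.reverse).map (fun k => ((u.length - 1 - k : Nat) : Int)) := by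
  induction u using List.reverseRecOn with
  | nil => simp [posDict, PySem.List.enumerate]
  | append_singleton u x ih =>
    rw [posDict_append]
    have hrev : (u ++ [x]).reverse = x :: u.reverse := by simp
    rw [hrev]
    by_cases hax : a = x
    · subst hax
      rw [PySem.Dict.get?_insert_self, ← PySem.List.index?_eq_idxOf?,
          PySem.List.index?_cons_self, Option.map_some]
      simp
    · have hx : x ≠ a := fun h => hax h.symm
      rw [PySem.Dict.get?_insert_of_ne _ _ hax, ih]
      have hcons : List.idxOf? a (x :: u.reverse) = Option.map (· + 1) (List.idxOf? a u.reverse) := by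
        have := PySem.List.index?_cons_of_ne (x := x) (v := a) u.reverse hx
        simpa using this
      rw [hcons]
      cases h : List.idxOf? a u.reverse with
      | none => simp
      | some k =>
        simp only [Option.map_some, Option.some.injEq, List.length_append,
          List.length_cons, List.length_nil]
        omega

lemma validateLoop_true (pos : PySem.Dict Int Int) (rs : List (Int × Int)) :
    validateLoop pos rs = true ↔
      ∀ p ∈ rs, ∀ px py, pos.get? p.1 = some px → pos.get? p.2 = some py → px ≤ py := by
  induction rs with
  | nil => simp [validateLoop]
  | cons p rest ih =>
    obtain ⟨x, y⟩ := p
    simp only [validateLoop]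
    cases hx : pos.get? x <;> cases hy : pos.get? y
    · simp_all
    · simp_all
    · simp_all
    · simp only []
      split_ifs with h
      · simp only [false_iff]
        intro hall
        have := hall (x, y) (by simp) _ _ hx hy
        omega
      · rw [ih]
        constructor
        · intro hr p hp
          rcases List.mem_cons.mp hp with rfl | hp'
          · intro px py hgx hgy
            rw [hx] at hgx; rw [hy] at hgy
            cases hgx; cases hgy; omega
          · exact hr p hp'
        · intro hall p hp
          exact hall p (List.mem_cons_of_mem _ hp)

lemma mem_ruleIndex (rules : List (Int × Int)) (x y : Int) :
    y ∈ (ruleIndex rules).getD x [] ↔ (x, y) ∈ rules := by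
  induction rules using List.reverseRecOn with
  | nil => simp [ruleIndex, PySem.Dict.getD, PySem.Dict.get?, PySem.Dict.empty]
  | append_singleton rs p ih =>
    obtain ⟨a, b⟩ := p
    rw [ruleIndex, List.foldl_append]
    by_cases hxa : x = a
    · subst hxa
      simp only [List.foldl_cons, List.foldl_nil]
      rw [show (rs.foldl (fun d p => d.modify p.1 [] (fun l => l ++ [p.2])) PySem.Dict.empty) = ruleIndex rs from rfl,
          PySem.Dict.getD_modify_self]
      simp [ih]
    · simp only [List.foldl_cons, List.foldl_nil]
      rw [show (rs.foldl (fun d p => d.modify p.1 [] (fun l => l ++ [p.2])) PySem.Dict.empty) = ruleIndex rs from rfl,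
          PySem.Dict.getD_modify_of_ne _ _ _ hxa]
      simp [ih, hxa]

-- loop invariant of B's reverse pass: seen = already-processed distinct pages
lemma orderedLoop_true (succ : PySem.Dict Int (List Int)) (pages : PySem.Set Int)
    (s : PySem.Set Int) (w : List Int) :
    orderedLoop succ pages s w = true ↔
      ∀ (i : Nat) (hi : i < w.length), w[i] ∉ s → w[i] ∉ w.take i →
        ∀ y ∈ succ.getD w[i] [], y = w[i] ∨ y ∉ pages ∨ y ∈ s ∨ y ∈ w.take i := by
  induction w generalizing s with
  | nil => simp [orderedLoop]
  | cons v rest ih =>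
    simp only [orderedLoop]
    by_cases hv : v ∈ s
    · rw [if_pos (by simpa [PySem.Set.contains] using hv), ih]
      constructor
      · intro hr i hi hs ht
        cases i with
        | zero => exact absurd hv (by simpa using hs)
        | succ i =>
          have hi' : i < rest.length := by simpa using hi
          simp only [List.getElem_cons_succ] at hs ht ⊢
          have ht' : rest[i] ∉ rest.take i := by
            intro hm; exact ht (by simp [List.take_succ_cons, hm])
          intro y hy
          rcases hr i hi' hs ht' y hy with h | h | h | h
          · exact Or.inl h
          · exact Or.inr (Or.inl h)
          · exact Or.inr (Or.inr (Or.inl h))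
          · exact Or.inr (Or.inr (Or.inr (by simp [List.take_succ_cons, h])))
      · intro hr i hi hs ht
        have hne : rest[i] ≠ v := fun h => hs (h ▸ hv)
        have := hr (i + 1) (by simpa using hi) (by simpa using hs)
          (by simp only [List.take_succ_cons, List.mem_cons, not_or]; exact ⟨hne, ht⟩)
        simp only [List.getElem_cons_succ] at this
        intro y hy
        rcases this y hy with h | h | h | h
        · exact Or.inl h
        · exact Or.inr (Or.inl h)
        · exact Or.inr (Or.inr (Or.inl h))
        · rcases List.mem_cons.mp (by simpa [List.take_succ_cons] using h) with rfl | h'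
          · exact Or.inr (Or.inr (Or.inl hv))
          · exact Or.inr (Or.inr (Or.inr h'))
    · rw [if_neg (by simpa [PySem.Set.contains] using hv)]
      split_ifs with h2
      · simp only [false_iff]
        intro hr
        rcases List.any_eq_true.mp h2 with ⟨y, hy, hprop⟩
        simp only [Bool.and_eq_true, bne_iff_ne, Bool.not_eq_true'] at hprop
        obtain ⟨⟨hyv, hyp⟩, hys⟩ := hprop
        rcases hr 0 (by simp) (by simpa using hv) (by simp) y hy with h | h | h | h
        · exact hyv h
        · exact h (by simpa [PySem.Set.contains] using hyp)
        · exact absurd h (by simpa [PySem.Set.contains] using hys)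
        · simp at h
      · rw [ih]
        have h0 : ∀ y ∈ succ.getD v [], y = v ∨ y ∉ pages ∨ y ∈ s := by
          intro y hy
          by_cases h1 : y = v
          · exact Or.inl h1
          by_cases h3 : y ∈ pages
          · by_cases h4 : y ∈ s
            · exact Or.inr (Or.inr h4)
            · exact absurd h2 (by
                simp only [List.any_eq_true, not_not]
                exact ⟨y, hy, by
                  simp only [Bool.and_eq_true, bne_iff_ne, Bool.not_eq_true']
                  exact ⟨⟨h1, by simpa [PySem.Set.contains] using h3⟩,
                    by simpa [PySem.Set.contains] using h4⟩⟩)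
          · exact Or.inr (Or.inl h3)
        constructor
        · intro hr i hi hs ht
          cases i with
          | zero =>
            intro y hy
            rcases h0 y (by simpa using hy) with h | h | h
            · exact Or.inl (by simpa using h)
            · exact Or.inr (Or.inl h)
            · exact Or.inr (Or.inr (Or.inl (by simp [h])))
          | succ i =>
            have hi' : i < rest.length := by simpa using hi
            simp only [List.getElem_cons_succ] at hs ht ⊢
            have hne : rest[i] ≠ v := fun h => ht (by simp [List.take_succ_cons, h])
            have ht' : rest[i] ∉ rest.take i := fun hm => ht (by simp [List.take_succ_cons, hm])
            have hs' : rest[i] ∉ PySem.Set.add s v := by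
              intro hm
              rcases (PySem.Set.mem_add _ _ _).mp hm with hm' | hm'
              · exact hs hm'
              · exact hne hm'
            intro y hy
            rcases hr i hi' hs' ht' y hy with h | h | h | h
            · exact Or.inl h
            · exact Or.inr (Or.inl h)
            · rcases (PySem.Set.mem_add _ _ _).mp h with h' | h'
              · exact Or.inr (Or.inr (Or.inl h'))
              · exact Or.inr (Or.inr (Or.inr (by simp [List.take_succ_cons, h'])))
            · exact Or.inr (Or.inr (Or.inr (by simp [List.take_succ_cons, h])))
        · intro hr i hi hs ht
          have hne : rest[i] ≠ v := by
            intro h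
            exact hs ((PySem.Set.mem_add _ _ _).mpr (Or.inr h))
          have hs'' : rest[i] ∉ s := fun h => hs ((PySem.Set.mem_add _ _ _).mpr (Or.inl h))
          have := hr (i + 1) (by simpa using hi) (by simpa using hs'')
            (by simp only [List.take_succ_cons, List.mem_cons, not_or]; exact ⟨hne, ht⟩)
          simp only [List.getElem_cons_succ] at this
          intro y hy
          rcases this y hy with h | h | h | h
          · exact Or.inl h
          · exact Or.inr (Or.inl h)
          · exact Or.inr (Or.inr (Or.inl ((PySem.Set.mem_add _ _ _).mpr (Or.inl h))))
          · rcases List.mem_cons.mp (by simpa [List.take_succ_cons] using h) with rfl | h'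
            · exact Or.inr (Or.inr (Or.inl ((PySem.Set.mem_add _ _ _).mpr (Or.inr rfl))))
            · exact Or.inr (Or.inr (Or.inr h'))

-- the heart of the claim: both validators decide "every applicable rule respects LAST positions"
lemma validate_eq_ordered (rules : List (Int × Int)) (u : List Int) :
    validate_update u rules
      = orderedLoop (ruleIndex rules) (PySem.Set.ofList u) PySem.Set.empty u.reverse := by
  rw [Bool.eq_iff_iff, validate_update, validateLoop_true, orderedLoop_true]
  have hlen : u.reverse.length = u.length := by simp
  constructor
  · intro hA i hi _ ht y hy
    by_cases hyv : y = u.reverse[i]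
    · exact Or.inl hyv
    by_cases hyu : y ∈ u
    · have hxmem : (u.reverse[i], y) ∈ rules := (mem_ruleIndex rules _ _).mp hy
      have hix : List.idxOf? u.reverse[i] u.reverse = some i := by
        rw [List.idxOf?_eq_some_iff]
        refine ⟨hi, rfl, ?_⟩
        intro j hj hja
        exact ht (List.mem_take_iff_getElem.mpr ⟨j, by omega, hja⟩)
      have hymem : y ∈ u.reverse := by simpa using hyu
      rcases Option.isSome_iff_exists.mp
        ((List.isSome_idxOf? (l := u.reverse) (a := y)).mpr hymem) with ⟨ky, hky⟩
      rcases List.idxOf?_eq_some_iff.mp hky with ⟨hkylt, hkyget, -⟩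
      have := hA _ hxmem _ _
        (by rw [posDict_get?_rev, hix]; rfl)
        (by rw [posDict_get?_rev, hky]; rfl)
      have hkyi : ky ≤ i := by
        have hi' : i < u.length := by omega
        have hky' : ky < u.length := by simpa using hkylt
        have hle : (↑(u.length - 1 - i) : Int) ≤ ↑(u.length - 1 - ky) := by simpa using this
        have hle' : u.length - 1 - i ≤ u.length - 1 - ky := by exact_mod_cast hle
        omega
      have hne : ky ≠ i := fun h => hyv (by subst h; exact hkyget.symm)
      exact Or.inr (Or.inr (Or.inr
        (List.mem_take_iff_getElem.mpr ⟨ky, by omega, hkyget⟩)))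
    · exact Or.inr (Or.inl (by simpa [PySem.Set.mem_ofList] using hyu))
  · intro hB p hp px py hgx hgy
    rw [posDict_get?_rev] at hgx hgy
    rcases Option.map_eq_some_iff.mp hgx with ⟨kx, hkx, hpx⟩
    rcases Option.map_eq_some_iff.mp hgy with ⟨ky, hky, hpy⟩
    rcases List.idxOf?_eq_some_iff.mp hkx with ⟨hkxlt, hkxget, hkxmin⟩
    rcases List.idxOf?_eq_some_iff.mp hky with ⟨hkylt, hkyget, hkymin⟩
    by_cases hxy : p.1 = p.2
    · have hk : kx = ky := by
        rw [hxy] at hkx; rw [hkx] at hky; exact Option.some.inj hky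
      subst hpx hpy
      exact le_of_eq (by rw [hk])
    · have hky_le : ky ≤ kx := by
        by_contra hgt
        have hy : p.2 ∈ (ruleIndex rules).getD u.reverse[kx] [] := by
          rw [hkxget, mem_ruleIndex]
          exact (show ((p.1, p.2) : Int × Int) ∈ rules by simpa using hp)
        have ht : u.reverse[kx] ∉ u.reverse.take kx := by
          intro hm
          rcases List.mem_take_iff_getElem.mp hm with ⟨j, hj, hjget⟩
          exact hkxmin j (by omega) (by rw [hjget, hkxget])
        rcases hB kx hkxlt (by simp [PySem.Set.empty]) ht p.2 hy with h | h | h | h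
        · exact hxy (by rw [hkxget] at h; exact h.symm)
        · exact h (by
            rw [PySem.Set.mem_ofList]
            have : p.2 ∈ u.reverse := List.mem_of_getElem hkyget
            simpa using this)
        · simp [PySem.Set.empty] at h
        · rcases List.mem_take_iff_getElem.mp h with ⟨j, hj, hjget⟩
          have : ky ≤ j := by
            by_contra hlt
            exact hkymin j (by omega) hjget
          omega
      subst hpx hpy
      have h1 : kx < u.length := by simpa using hkxlt
      have h2 : ky < u.length := by simpa using hkylt
      have : u.length - 1 - kx ≤ u.length - 1 - ky := by omega
      exact_mod_cast this

lemma foldl_partition_eq (rules : List (Int × Int)) (updates : List (List Int))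
    (s : List (List Int) × List (List Int)) :
    updates.foldl
      (fun s update =>
        if validate_update update rules then (s.1 ++ [update], s.2) else (s.1, s.2 ++ [update])) s
    = updates.foldl
      (fun s update =>
        if orderedLoop (ruleIndex rules) (PySem.Set.ofList update) PySem.Set.empty update.reverse
        then (s.1 ++ [update], s.2)
        else (s.1, s.2 ++ [update])) s := by
  induction updates generalizing s with
  | nil => rfl
  | cons u rest ih =>
    simp only [List.foldl_cons]
    rw [validate_eq_ordered rules u]
    exact ih _

-- ===== VERDICT (by name: the statement is the Claim_ definition above) =====
theorem find_correct_updates_spec : Claim_equal_find_correct_updates := by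
  intro rules updates _
  unfold Spec_find_correct_updates find_correct_updates find_correct_updates_alt
  exact foldl_partition_eq rules updates _
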